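-- pv_equiv track=rewrite | github.com/PermutaTriangle/PermStruct | len_4_lists/correct_filter_insertion_encodable.py | is_decr_next_incr
-- ===== SOURCE A (Python) =====
-- def is_decr_next_incr(perm):
--     for i in range(len(perm) - 1):
--         if perm[i+1] > perm[i]:
--             for j in range(i+1,len(perm) - 1):
--                 if perm[j+1] < perm[j]:
--                     return False
--             break
--     return True
-- ===== SOURCE B (Python) =====
-- def is_decr_next_incr(perm):
--     if not perm:
--         return True
--     m = perm.index(min(perm))
--     for i in range(m):
--         if perm[i] < perm[i + 1]:
--             return False
--     for i in range(m, len(perm) - 1):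
--         if perm[i] > perm[i + 1]:
--             return False
--     return True
-- ===== Notes on version B (the rewrite author's own statement) =====
-- stated objective: alternative
-- what changed: Replaces A's scan-for-first-ascent with nested verification loop by locating the valley bottom up front (index of the minimum) and then verifying the prefix is non-increasing and the suffix is non-decreasing in two independent loops.
import Mathlib
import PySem

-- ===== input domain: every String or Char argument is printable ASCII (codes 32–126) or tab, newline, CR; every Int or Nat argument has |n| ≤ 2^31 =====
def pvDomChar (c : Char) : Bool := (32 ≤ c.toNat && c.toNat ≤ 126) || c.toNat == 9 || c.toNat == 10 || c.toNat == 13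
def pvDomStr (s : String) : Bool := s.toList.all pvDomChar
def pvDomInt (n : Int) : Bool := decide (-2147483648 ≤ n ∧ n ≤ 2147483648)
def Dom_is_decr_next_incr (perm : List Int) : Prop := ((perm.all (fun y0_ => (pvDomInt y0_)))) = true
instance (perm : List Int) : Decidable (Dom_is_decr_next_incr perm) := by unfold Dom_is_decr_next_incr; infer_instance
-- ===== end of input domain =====

-- B locates the valley bottom (index of the minimum) first and verifies both slopes
-- in two independent loops, instead of A's scan-for-first-ascent with a nested check.

-- ===== PORT A =====
-- inner loop: for j in range(j0, len(perm)-1): if perm[j+1] < perm[j]: return False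
def aInner (perm : List Int) (j : Nat) : Bool :=
  if j + 1 < perm.length then
    if perm.getD (j+1) 0 < perm.getD j 0 then false
    else aInner perm (j+1)
  else true
termination_by perm.length - j

-- outer loop: for i in range(i0, len(perm)-1): if perm[i+1] > perm[i]: <inner, then break>
def aOuter (perm : List Int) (i : Nat) : Bool :=
  if i + 1 < perm.length then
    if perm.getD i 0 < perm.getD (i+1) 0 then aInner perm (i+1)
    else aOuter perm (i+1)
  else true
termination_by perm.length - i

def is_decr_next_incr (perm : List Int) : Bool := aOuter perm 0

-- ===== PORT B =====
-- for i in range(i0, m): if perm[i] < perm[i+1]: return False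
def bDown (perm : List Int) (i m : Nat) : Bool :=
  if i < m then
    if perm.getD i 0 < perm.getD (i+1) 0 then false
    else bDown perm (i+1) m
  else true
termination_by m - i

-- for i in range(i0, len(perm)-1): if perm[i] > perm[i+1]: return False
def bUp (perm : List Int) (i : Nat) : Bool :=
  if i + 1 < perm.length then
    if perm.getD (i+1) 0 < perm.getD i 0 then false
    else bUp perm (i+1)
  else true
termination_by perm.length - i

def is_decr_next_incr_alt (perm : List Int) : Bool :=
  if perm.isEmpty then true
  else
    -- m = perm.index(min(perm)); perm is nonempty so both matches take the some branch
    let m : Nat :=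
      match PySem.List.min? perm (fun x => x) with
      | some v => (PySem.List.index? perm v).getD 0
      | none => 0
    bDown perm 0 m && bUp perm m

-- ===== PRECONDITION & SPEC =====
def Spec_is_decr_next_incr (perm : List Int) (out : Bool) : Prop := out = is_decr_next_incr_alt perm
instance (perm : List Int) (out : Bool) : Decidable (Spec_is_decr_next_incr perm out) := by unfold Spec_is_decr_next_incr; infer_instance

-- ===== CLAIM (what is proved, stated in full; the proofs are below) =====
def Claim_equal_is_decr_next_incr : Prop := ∀ (perm : List Int), Dom_is_decr_next_incr perm → Spec_is_decr_next_incr perm (is_decr_next_incr perm)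

-- ===== LEMMAS AND PROOFS =====

-- "no descent after any ascent", from position i on
def Q (perm : List Int) (i : Nat) : Prop :=
  ∀ k j, i ≤ k → k < j → j + 1 < perm.length →
    perm.getD k 0 < perm.getD (k+1) 0 → perm.getD j 0 ≤ perm.getD (j+1) 0

lemma aInner_char (perm : List Int) (j0 : Nat) :
    aInner perm j0 = true ↔
      ∀ j, j0 ≤ j → j + 1 < perm.length → perm.getD j 0 ≤ perm.getD (j+1) 0 := by
  induction j0 using aInner.induct perm with
  | case1 j h hd =>
      rw [aInner]; simp only [if_pos h, if_pos hd]
      constructor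
      · intro hf; exact absurd hf (by simp)
      · intro hall; exact absurd (hall j le_rfl h) (by omega)
  | case2 j h hd ih =>
      rw [aInner]; simp only [if_pos h, if_neg hd]
      rw [ih]
      constructor
      · intro hall k hk hk1
        rcases Nat.eq_or_lt_of_le hk with rfl | hlt
        · omega
        · exact hall k hlt hk1
      · intro hall k hk hk1; exact hall k (Nat.le_of_succ_le hk) hk1
  | case3 j h =>
      rw [aInner]; simp only [if_neg h]
      constructor
      · intro _ k hk hk1; omega
      · intro _; trivial

lemma aOuter_char (perm : List Int) (i : Nat) : aOuter perm i = true ↔ Q perm i := by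
  induction i using aOuter.induct perm with
  | case1 i h ha =>
      rw [aOuter]; simp only [if_pos h, if_pos ha]
      rw [aInner_char]
      constructor
      · intro hall k j hik hkj hj1 _; exact hall j (by omega) hj1
      · intro hq j hij hj1; exact hq i j le_rfl (by omega) hj1 ha
  | case2 i h ha ih =>
      rw [aOuter]; simp only [if_pos h, if_neg ha]
      rw [ih]
      constructor
      · intro hq k j hik hkj hj1 hasc
        rcases Nat.eq_or_lt_of_le hik with rfl | hlt
        · exact absurd hasc ha
        · exact hq k j hlt hkj hj1 hasc
      · intro hq k j hik hkj hj1 hasc; exact hq k j (Nat.le_of_succ_le hik) hkj hj1 hasc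
  | case3 i h =>
      rw [aOuter]; simp only [if_neg h]
      constructor
      · intro _ k j hik hkj hj1 _; omega
      · intro _; trivial

lemma bDown_char (perm : List Int) (i0 m : Nat) :
    bDown perm i0 m = true ↔
      ∀ k, i0 ≤ k → k < m → ¬ (perm.getD k 0 < perm.getD (k+1) 0) := by
  induction i0 using bDown.induct perm m with
  | case1 i h hd =>
      rw [bDown]; simp only [if_pos h, if_pos hd]
      constructor
      · intro hf; exact absurd hf (by simp)
      · intro hall; exact absurd hd (hall i le_rfl h)
  | case2 i h hd ih =>
      rw [bDown]; simp only [if_pos h, if_neg hd]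
      rw [ih]
      constructor
      · intro hall k hk hk1
        rcases Nat.eq_or_lt_of_le hk with rfl | hlt
        · exact hd
        · exact hall k hlt hk1
      · intro hall k hk hk1; exact hall k (Nat.le_of_succ_le hk) hk1
  | case3 i h =>
      rw [bDown]; simp only [if_neg h]
      constructor
      · intro _ k hk hk1; omega
      · intro _; trivial

lemma bUp_char (perm : List Int) (i0 : Nat) :
    bUp perm i0 = true ↔
      ∀ k, i0 ≤ k → k + 1 < perm.length → perm.getD k 0 ≤ perm.getD (k+1) 0 := by
  induction i0 using bUp.induct perm with
  | case1 i h hd =>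
      rw [bUp]; simp only [if_pos h, if_pos hd]
      constructor
      · intro hf; exact absurd hf (by simp)
      · intro hall; exact absurd (hall i le_rfl h) (by omega)
  | case2 i h hd ih =>
      rw [bUp]; simp only [if_pos h, if_neg hd]
      rw [ih]
      constructor
      · intro hall k hk hk1
        rcases Nat.eq_or_lt_of_le hk with rfl | hlt
        · omega
        · exact hall k hlt hk1
      · intro hall k hk hk1; exact hall k (Nat.le_of_succ_le hk) hk1
  | case3 i h =>
      rw [bUp]; simp only [if_neg h]
      constructor
      · intro _ k hk hk1; omega
      · intro _; trivial

lemma chain_le (f : Nat → Int) (a b : Nat) (h : a ≤ b)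
    (step : ∀ k, a ≤ k → k < b → f k ≤ f (k+1)) : f a ≤ f b := by
  induction b, h using Nat.le_induction with
  | base => exact le_refl _
  | succ b hab ih =>
      exact le_trans (ih fun k hk hk' => step k hk (Nat.lt_succ_of_lt hk'))
        (step b hab (Nat.lt_succ_self b))

lemma main_equiv (perm : List Int) : is_decr_next_incr perm = is_decr_next_incr_alt perm := by
  unfold is_decr_next_incr is_decr_next_incr_alt
  by_cases hnil : perm.isEmpty
  · rw [if_pos hnil, aOuter]
    have : perm.length = 0 := by simpa [List.isEmpty_iff_length_eq_zero] using hnil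
    simp [this]
  · rw [if_neg hnil]
    have hne : perm ≠ [] := by simpa [List.isEmpty_iff] using hnil
    obtain ⟨v, hv⟩ : ∃ v, PySem.List.min? perm (fun x => x) = some v := by
      cases h : PySem.List.min? perm (fun x => x) with
      | none => exact absurd ((PySem.List.min?_eq_none_iff _ _).mp h) hne
      | some v => exact ⟨v, rfl⟩
    have hvmem : v ∈ perm := PySem.List.min?_mem hv
    obtain ⟨m, hm⟩ : ∃ m, PySem.List.index? perm v = some m := by
      have := (PySem.List.index?_isSome_iff (xs := perm) (v := v)).mpr hvmem
      exact Option.isSome_iff_exists.mp this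
    obtain ⟨hmlen, hmval, -⟩ := PySem.List.getElem_of_index?_eq_some hm
    have hmget : perm.getD m 0 = v := by rw [List.getD_eq_getElem _ _ hmlen, hmval]
    have hmin : ∀ i, i < perm.length → v ≤ perm.getD i 0 := by
      intro i hi
      rw [List.getD_eq_getElem _ _ hi]
      exact PySem.List.min?_isMin hv _ (List.getElem_mem hi)
    simp only [hv, hm, Option.getD_some]
    rw [Bool.eq_iff_iff, aOuter_char, Bool.and_eq_true, bDown_char, bUp_char]
    constructor
    · intro hq
      constructor
      · intro k _ hkm hasc
        have hchain : perm.getD (k+1) 0 ≤ perm.getD m 0 := by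
          refine chain_le (fun n => perm.getD n 0) (k+1) m hkm ?_
          intro t ht htm
          exact hq k t (Nat.zero_le _) (by omega) (by omega) hasc
        have hvk : v ≤ perm.getD k 0 := hmin k (by omega)
        rw [hmget] at hchain
        omega
      · intro k hmk hk1
        by_contra hgt
        push Not at hgt
        have hchain : -(perm.getD m 0) ≤ -(perm.getD k 0) := by
          refine chain_le (fun n => -(perm.getD n 0)) m k hmk ?_
          intro t ht htk
          have hnoasc : ¬ (perm.getD t 0 < perm.getD (t+1) 0) := by
            intro hasc
            exact absurd (hq t k (Nat.zero_le _) htk hk1 hasc) (by omega)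
          simpa using (by omega : perm.getD (t+1) 0 ≤ perm.getD t 0)
        have hvk1 : v ≤ perm.getD (k+1) 0 := hmin (k+1) hk1
        rw [hmget] at hchain
        omega
    · rintro ⟨hd, hu⟩ k j _ hkj hj1 hasc
      by_cases hkm : k < m
      · exact absurd hasc (hd k (Nat.zero_le _) hkm)
      · exact hu j (by omega) hj1

-- ===== VERDICT (by name: the statement is the Claim_ definition above) =====
theorem is_decr_next_incr_spec : Claim_equal_is_decr_next_incr := by
  intro perm _
  unfold Spec_is_decr_next_incr
  exact main_equiv perm
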